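-- pv_equiv track=rewrite | github.com/enpeluche/subset-sum-lll-mip | lll_analysis.py | local_search_around_projection
-- ===== SOURCE A (Python) =====
-- def local_search_around_projection(
--     v_proj: list[int],
--     weights: list[int],
--     T: int,
--     max_flips: int = 2,
-- ) -> list[int] | None:
--     """
--     Search for an exact solution by flipping up to max_flips bits of v_proj.
--
--     This is an exact k-opt search guided by the residual structure:
--     since all a_i are known, we can check each neighbor in O(n^k).
--
--     Args:
--         v_proj:    Binary starting point (projected LLL vector).
--         weights:   Instance weights.
--         T:         Target sum.
--         max_flips: Maximum number of simultaneous bit flips (1, 2, or 3).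
--
--     Returns:
--         A valid solution vector if found, None otherwise.
--     """
--     n = len(weights)
--
--     def residual(v):
--         return abs(sum(weights[i] * v[i] for i in range(n)) - T)
--
--     if residual(v_proj) == 0:
--         return v_proj
--
--     # 1-flip
--     for i in range(n):
--         v = v_proj.copy()
--         v[i] = 1 - v[i]
--         if residual(v) == 0:
--             return v
--
--     if max_flips < 2:
--         return None
--
--     # 2-flip
--     for i in range(n):
--         for j in range(i + 1, n):
--             v = v_proj.copy()
--             v[i] = 1 - v[i]
--             v[j] = 1 - v[j]
--             if residual(v) == 0:
--                 return v
--
--     if max_flips < 3: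
--         return None
--
--     # 3-flip
--     for i in range(n):
--         for j in range(i + 1, n):
--             for k in range(j + 1, n):
--                 v = v_proj.copy()
--                 v[i] = 1 - v[i]
--                 v[j] = 1 - v[j]
--                 v[k] = 1 - v[k]
--                 if residual(v) == 0:
--                     return v
--
--     return None
-- ===== SOURCE B (Python) =====
-- def local_search_around_projection(
--     v_proj: list[int],
--     weights: list[int],
--     T: int,
--     max_flips: int = 2,
-- ) -> list[int] | None:
--     """Exact k-opt search, but with the base sum and per-bit deltas precomputed
--     so each candidate is tested in O(1) instead of re-summing in O(n)."""
--     n = len(weights)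
--     base = sum(weights[i] * v_proj[i] for i in range(n)) - T
--     if base == 0:
--         return v_proj
--     delta = [weights[i] * (1 - 2 * v_proj[i]) for i in range(n)]
--
--     def search(start, r, acc):
--         # lexicographically first r-subset of [start, n) whose deltas sum to -acc
--         if r == 0:
--             return [] if acc == 0 else None
--         for i in range(start, n):
--             rest = search(i + 1, r - 1, acc + delta[i])
--             if rest is not None:
--                 return [i] + rest
--         return None
--
--     for r in range(1, min(max(max_flips, 1), 3) + 1):
--         found = search(0, r, base)
--         if found is not None:
--             v = v_proj.copy()
--             for i in found:
--                 v[i] = 1 - v[i]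
--             return v
--     return None
-- ===== Notes on version B (the rewrite author's own statement) =====
-- stated objective: faster
-- what changed: B precomputes the base residual and a per-bit delta list once, then tests each candidate flip set in O(1) via a uniform recursive combination search, instead of A's re-summing all n weighted terms for every candidate.
import Mathlib
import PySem

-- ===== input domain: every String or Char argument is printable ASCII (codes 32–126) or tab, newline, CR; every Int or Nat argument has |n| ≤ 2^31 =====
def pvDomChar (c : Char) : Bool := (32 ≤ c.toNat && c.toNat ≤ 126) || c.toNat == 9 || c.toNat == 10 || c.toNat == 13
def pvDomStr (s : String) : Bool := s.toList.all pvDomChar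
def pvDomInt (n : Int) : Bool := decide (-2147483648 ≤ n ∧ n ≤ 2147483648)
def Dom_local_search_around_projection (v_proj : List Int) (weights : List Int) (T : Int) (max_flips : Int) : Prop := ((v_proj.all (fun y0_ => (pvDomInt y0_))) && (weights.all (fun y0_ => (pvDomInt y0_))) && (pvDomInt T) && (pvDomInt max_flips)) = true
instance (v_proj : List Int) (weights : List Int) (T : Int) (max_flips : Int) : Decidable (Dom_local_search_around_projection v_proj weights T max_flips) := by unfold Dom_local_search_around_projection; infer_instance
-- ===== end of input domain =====

-- B precomputes the base residual and per-bit flip deltas so each k-flip candidate is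
-- tested in O(1) instead of re-summing all n terms (objective: faster, O(n^k) vs O(n^(k+1))).

-- ===== PORT A =====
-- v[i] = 1 - v[i]
def pvFlip (v : List Int) (i : Nat) : List Int := v.set i (1 - v.getD i 0)

-- abs(sum(weights[i]*v[i] for i in range(n)) - T)
def pvResidualA (weights : List Int) (T : Int) (n : Nat) (v : List Int) : Int :=
  |(List.range n).foldl (fun s i => s + weights.getD i 0 * v.getD i 0) 0 - T|

-- the 1-flip loop of A
def pvStage1 (weights : List Int) (T : Int) (n : Nat) (v_proj : List Int) : Option (List Int) :=
  (List.range n).findSome? (fun i =>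
    let v := pvFlip v_proj i
    if pvResidualA weights T n v = 0 then some v else none)

-- the 2-flip nested loops of A
def pvStage2 (weights : List Int) (T : Int) (n : Nat) (v_proj : List Int) : Option (List Int) :=
  (List.range n).findSome? (fun i =>
    (List.range' (i+1) (n - (i+1))).findSome? (fun j =>
      let v := pvFlip (pvFlip v_proj i) j
      if pvResidualA weights T n v = 0 then some v else none))

-- the 3-flip nested loops of A
def pvStage3 (weights : List Int) (T : Int) (n : Nat) (v_proj : List Int) : Option (List Int) :=
  (List.range n).findSome? (fun i =>
    (List.range' (i+1) (n - (i+1))).findSome? (fun j =>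
      (List.range' (j+1) (n - (j+1))).findSome? (fun k =>
        let v := pvFlip (pvFlip (pvFlip v_proj i) j) k
        if pvResidualA weights T n v = 0 then some v else none)))

def local_search_around_projection (v_proj : List Int) (weights : List Int) (T : Int) (max_flips : Int) : Option (List Int) :=
  if pvResidualA weights T weights.length v_proj = 0 then some v_proj
  else
    match pvStage1 weights T weights.length v_proj with
    | some v => some v
    | none =>
      if max_flips < 2 then none
      else
        match pvStage2 weights T weights.length v_proj with
        | some v => some v
        | none =>
          if max_flips < 3 then none
          else pvStage3 weights T weights.length v_proj

-- ===== PORT B =====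
-- sum(weights[i]*v_proj[i] for i in range(n)) - T
def pvBase (weights : List Int) (v_proj : List Int) (n : Nat) (T : Int) : Int :=
  (List.range n).foldl (fun s i => s + weights.getD i 0 * v_proj.getD i 0) 0 - T

-- [weights[i] * (1 - 2*v_proj[i]) for i in range(n)]
def pvDeltas (weights : List Int) (v_proj : List Int) (n : Nat) : List Int :=
  (List.range n).map (fun i => weights.getD i 0 * (1 - 2 * v_proj.getD i 0))

-- B's recursive `search`: lexicographically first r-subset of [start, n) whose deltas sum to -acc
def pvSearch (delta : List Int) (n : Nat) (start : Nat) (r : Nat) (acc : Int) : Option (List Nat) :=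
  match r with
  | 0 => if acc = 0 then some [] else none
  | r+1 =>
    (List.range' start (n - start)).findSome? (fun i =>
      (pvSearch delta n (i+1) r (acc + delta.getD i 0)).map (fun rest => i :: rest))

def local_search_around_projection_alt (v_proj : List Int) (weights : List Int) (T : Int) (max_flips : Int) : Option (List Int) :=
  if pvBase weights v_proj weights.length T = 0 then some v_proj
  else
    (List.range' 1 (min (max max_flips 1) 3).toNat).findSome? (fun r =>
      (pvSearch (pvDeltas weights v_proj weights.length) weights.length 0 r
          (pvBase weights v_proj weights.length T)).map
        (fun idxs => idxs.foldl pvFlip v_proj))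

-- ===== PRECONDITION & SPEC =====
-- Pre_ excludes exactly the inputs with len(v_proj) < len(weights), on which A's residual
-- computation raises IndexError (B raises there too).
def Pre_local_search_around_projection (v_proj : List Int) (weights : List Int) (T : Int) (max_flips : Int) : Prop :=
  weights.length ≤ v_proj.length
instance (v_proj : List Int) (weights : List Int) (T : Int) (max_flips : Int) : Decidable (Pre_local_search_around_projection v_proj weights T max_flips) := by unfold Pre_local_search_around_projection; infer_instance

def pvWitness_local_search_around_projection : List Int × List Int × Int × Int := ([0, 1], [2, 3], 5, 2)

def Spec_local_search_around_projection (v_proj : List Int) (weights : List Int) (T : Int) (max_flips : Int) (out : Option (List Int)) : Prop := out = local_search_around_projection_alt v_proj weights T max_flips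
instance (v_proj : List Int) (weights : List Int) (T : Int) (max_flips : Int) (out : Option (List Int)) : Decidable (Spec_local_search_around_projection v_proj weights T max_flips out) := by unfold Spec_local_search_around_projection; infer_instance

-- ===== CLAIM (what is proved, stated in full; the proofs are below) =====
def Claim_equal_local_search_around_projection : Prop := ∀ (v_proj : List Int) (weights : List Int) (T : Int) (max_flips : Int), Dom_local_search_around_projection v_proj weights T max_flips → Pre_local_search_around_projection v_proj weights T max_flips → Spec_local_search_around_projection v_proj weights T max_flips (local_search_around_projection v_proj weights T max_flips)

-- ===== LEMMAS AND PROOFS =====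

theorem pv_foldl_congr {α : Type} (l : List α) (f g : Int → α → Int) (a : Int)
    (h : ∀ s : Int, ∀ x ∈ l, f s x = g s x) : l.foldl f a = l.foldl g a := by
  induction l generalizing a with
  | nil => rfl
  | cons b t ih =>
    simp only [List.foldl_cons]
    rw [h a b (by simp)]
    exact ih (g a b) (fun s x hx => h s x (by simp [hx]))

theorem pv_getD_set_ne (v : List Int) (i j : Nat) (x : Int) (h : j ≠ i) :
    (v.set i x).getD j 0 = v.getD j 0 := by
  simp [List.getD, List.getElem?_set_ne (Ne.symm h)]

theorem pv_getD_set_self (v : List Int) (i : Nat) (x : Int) (h : i < v.length) :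
    (v.set i x).getD i 0 = x := by
  simp [List.getD, h]

theorem pv_flip_length (v : List Int) (i : Nat) : (pvFlip v i).length = v.length := by
  simp [pvFlip]

theorem pv_flip_getD_ne (v : List Int) (i j : Nat) (h : j ≠ i) :
    (pvFlip v i).getD j 0 = v.getD j 0 := pv_getD_set_ne v i j _ h

theorem pv_sum_set (w v : List Int) (n i : Nat) (x : Int) (hin : i < n) (hiv : i < v.length) :
    (List.range n).foldl (fun s k => s + w.getD k 0 * (v.set i x).getD k 0) 0
      = (List.range n).foldl (fun s k => s + w.getD k 0 * v.getD k 0) 0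
        + w.getD i 0 * (x - v.getD i 0) := by
  induction n with
  | zero => omega
  | succ n ih =>
    rw [List.range_succ, List.foldl_append, List.foldl_append]
    simp only [List.foldl_cons, List.foldl_nil]
    rcases Nat.lt_succ_iff_lt_or_eq.mp hin with hlt | heq
    · rw [ih hlt, pv_getD_set_ne v i n x (by omega)]; ring
    · subst heq
      rw [pv_foldl_congr _ _ (fun s k => s + w.getD k 0 * v.getD k 0) 0
            (fun s k hk => by rw [pv_getD_set_ne v i k x (by simp at hk; omega)]),
          pv_getD_set_self v i x hiv]
      ring

theorem pv_sum_flip (w v : List Int) (n i : Nat) (hin : i < n) (hiv : i < v.length) :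
    (List.range n).foldl (fun s k => s + w.getD k 0 * (pvFlip v i).getD k 0) 0
      = (List.range n).foldl (fun s k => s + w.getD k 0 * v.getD k 0) 0
        + w.getD i 0 * (1 - 2 * v.getD i 0) := by
  unfold pvFlip
  rw [pv_sum_set w v n i _ hin hiv]; ring

theorem pv_deltas_getD (w v : List Int) (n i : Nat) (hin : i < n) :
    (pvDeltas w v n).getD i 0 = w.getD i 0 * (1 - 2 * v.getD i 0) := by
  simp [pvDeltas, List.getD, hin]

theorem pv_findSome?_congr {α β : Type} (l : List α) (f g : α → Option β)
    (h : ∀ a ∈ l, f a = g a) : l.findSome? f = l.findSome? g := by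
  induction l with
  | nil => rfl
  | cons a t ih =>
    simp only [List.findSome?_cons]
    rw [h a (by simp)]
    cases g a with
    | some b => rfl
    | none => exact ih (fun x hx => h x (by simp [hx]))

theorem pv_findSome?_map {α β γ : Type} (l : List α) (f : α → Option β) (g : β → γ) :
    l.findSome? (fun a => (f a).map g) = (l.findSome? f).map g := by
  induction l with
  | nil => rfl
  | cons a t ih =>
    simp only [List.findSome?_cons]
    cases hfa : f a <;> simp [ih]

theorem pv_stage1_eq (w v : List Int) (T : Int) (hpre : w.length ≤ v.length) :
    pvStage1 w T w.length v
      = (pvSearch (pvDeltas w v w.length) w.length 0 1 (pvBase w v w.length T)).map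
          (fun idxs => idxs.foldl pvFlip v) := by
  unfold pvStage1
  simp only [pvSearch, Nat.sub_zero, ← pv_findSome?_map, ← List.range_eq_range']
  apply pv_findSome?_congr
  intro i hi
  have hilt : i < w.length := List.mem_range.mp hi
  have hiv : i < v.length := lt_of_lt_of_le hilt hpre
  have hres : pvResidualA w T w.length (pvFlip v i)
      = |pvBase w v w.length T + (pvDeltas w v w.length).getD i 0| := by
    unfold pvResidualA pvBase
    rw [pv_sum_flip w v w.length i hilt hiv, pv_deltas_getD w v w.length i hilt]
    congr 1; ring
  simp only [hres, abs_eq_zero]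
  by_cases hc : pvBase w v w.length T + (pvDeltas w v w.length).getD i 0 = 0 <;>
    simp [hc, List.foldl]

theorem pv_stage2_eq (w v : List Int) (T : Int) (hpre : w.length ≤ v.length) :
    pvStage2 w T w.length v
      = (pvSearch (pvDeltas w v w.length) w.length 0 2 (pvBase w v w.length T)).map
          (fun idxs => idxs.foldl pvFlip v) := by
  unfold pvStage2
  simp only [pvSearch, Nat.sub_zero, ← pv_findSome?_map, ← List.range_eq_range']
  apply pv_findSome?_congr
  intro i hi
  have hilt : i < w.length := List.mem_range.mp hi
  have hiv : i < v.length := lt_of_lt_of_le hilt hpre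
  apply pv_findSome?_congr
  intro j hj
  have hjm := (List.mem_range'_1).mp hj
  have hjlt : j < w.length := by omega
  have hji : i < j := by omega
  have hres : pvResidualA w T w.length (pvFlip (pvFlip v i) j)
      = |pvBase w v w.length T + (pvDeltas w v w.length).getD i 0
          + (pvDeltas w v w.length).getD j 0| := by
    unfold pvResidualA pvBase
    rw [pv_sum_flip w (pvFlip v i) w.length j hjlt
          (by rw [pv_flip_length]; exact lt_of_lt_of_le hjlt hpre),
        pv_flip_getD_ne v i j (by omega),
        pv_sum_flip w v w.length i hilt hiv,
        pv_deltas_getD w v w.length i hilt, pv_deltas_getD w v w.length j hjlt]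
    congr 1; ring
  simp only [hres, abs_eq_zero]
  by_cases hc : pvBase w v w.length T + (pvDeltas w v w.length).getD i 0
      + (pvDeltas w v w.length).getD j 0 = 0 <;>
    simp [hc, List.foldl]

theorem pv_stage3_eq (w v : List Int) (T : Int) (hpre : w.length ≤ v.length) :
    pvStage3 w T w.length v
      = (pvSearch (pvDeltas w v w.length) w.length 0 3 (pvBase w v w.length T)).map
          (fun idxs => idxs.foldl pvFlip v) := by
  unfold pvStage3
  simp only [pvSearch, Nat.sub_zero, ← pv_findSome?_map, ← List.range_eq_range']
  apply pv_findSome?_congr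
  intro i hi
  have hilt : i < w.length := List.mem_range.mp hi
  have hiv : i < v.length := lt_of_lt_of_le hilt hpre
  apply pv_findSome?_congr
  intro j hj
  have hjm := (List.mem_range'_1).mp hj
  have hjlt : j < w.length := by omega
  have hji : i < j := by omega
  apply pv_findSome?_congr
  intro k hk
  have hkm := (List.mem_range'_1).mp hk
  have hklt : k < w.length := by omega
  have hkj : j < k := by omega
  have hres : pvResidualA w T w.length (pvFlip (pvFlip (pvFlip v i) j) k)
      = |pvBase w v w.length T + (pvDeltas w v w.length).getD i 0
          + (pvDeltas w v w.length).getD j 0 + (pvDeltas w v w.length).getD k 0| := by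
    unfold pvResidualA pvBase
    rw [pv_sum_flip w (pvFlip (pvFlip v i) j) w.length k hklt
          (by rw [pv_flip_length, pv_flip_length]; exact lt_of_lt_of_le hklt hpre),
        pv_flip_getD_ne (pvFlip v i) j k (by omega),
        pv_flip_getD_ne v i k (by omega),
        pv_sum_flip w (pvFlip v i) w.length j hjlt
          (by rw [pv_flip_length]; exact lt_of_lt_of_le hjlt hpre),
        pv_flip_getD_ne v i j (by omega),
        pv_sum_flip w v w.length i hilt hiv,
        pv_deltas_getD w v w.length i hilt, pv_deltas_getD w v w.length j hjlt,
        pv_deltas_getD w v w.length k hklt]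
    congr 1; ring
  simp only [hres, abs_eq_zero]
  by_cases hc : pvBase w v w.length T + (pvDeltas w v w.length).getD i 0
      + (pvDeltas w v w.length).getD j 0 + (pvDeltas w v w.length).getD k 0 = 0 <;>
    simp [hc, List.foldl]

-- ===== VERDICT (by name: the statement is the Claim_ definition above) =====
theorem local_search_around_projection_spec : Claim_equal_local_search_around_projection := by
  intro v w T m _ hpre
  unfold Spec_local_search_around_projection local_search_around_projection
    local_search_around_projection_alt
  have hb : pvResidualA w T w.length v = |pvBase w v w.length T| := by
    unfold pvResidualA pvBase; rfl
  by_cases h0 : pvBase w v w.length T = 0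
  · rw [hb]; simp [h0]
  · rw [hb, if_neg (by simpa [abs_eq_zero] using h0), if_neg h0,
      pv_stage1_eq w v T hpre, pv_stage2_eq w v T hpre, pv_stage3_eq w v T hpre]
    by_cases hm2 : m < 2
    · have h1 : (min (max m 1) 3).toNat = 1 := by
        rw [max_eq_right (by omega : m ≤ 1)]; decide
      rw [h1, show List.range' 1 1 = [1] from rfl]
      cases hg1 : pvSearch (pvDeltas w v w.length) w.length 0 1 (pvBase w v w.length T) <;>
        simp [hg1, hm2, List.findSome?]
    · by_cases hm3 : m < 3
      · have hm : m = 2 := by omega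
        subst hm
        rw [show (min (max (2:Int) 1) 3).toNat = 2 from rfl, show List.range' 1 2 = [1, 2] from rfl]
        cases hg1 : pvSearch (pvDeltas w v w.length) w.length 0 1 (pvBase w v w.length T) <;>
          cases hg2 : pvSearch (pvDeltas w v w.length) w.length 0 2 (pvBase w v w.length T) <;>
          simp [hg1, hg2, List.findSome?]
      · have h3 : (min (max m 1) 3).toNat = 3 := by
          rw [max_eq_left (by omega : 1 ≤ m), min_eq_right (by omega : (3:Int) ≤ m)]; decide
        rw [h3, show List.range' 1 3 = [1, 2, 3] from rfl]
        cases hg1 : pvSearch (pvDeltas w v w.length) w.length 0 1 (pvBase w v w.length T) <;>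
          cases hg2 : pvSearch (pvDeltas w v w.length) w.length 0 2 (pvBase w v w.length T) <;>
          cases hg3 : pvSearch (pvDeltas w v w.length) w.length 0 3 (pvBase w v w.length T) <;>
          simp [hg1, hg2, hg3, hm2, hm3, List.findSome?]
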